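-- pv_equiv track=rewrite | github.com/taxoniq/taxoniq | taxoniq/build.py | load_common_names
-- ===== SOURCE A (Python) =====
-- def load_common_names(names):
--     for tax_id, tax_names in names.items():
--         if "blast name" in tax_names:
--             yield (tax_id, tax_names["blast name"])
--         elif "genbank common name" in tax_names:
--             yield (tax_id, tax_names["genbank common name"])
--         elif "common name" in tax_names:
--             yield (tax_id, tax_names["common name"])
--         else:
--             pass  # FIXME: fall back to en_wiki_title
-- ===== SOURCE B (Python) =====
-- RANK = {"blast name": 0, "genbank common name": 1, "common name": 2}
--
-- def load_common_names(names):
--     for tax_id, tax_names in names.items():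
--         best = None  # (rank, value) of the best-ranked name seen so far
--         for key, value in tax_names.items():
--             r = RANK.get(key)
--             if r is not None and (best is None or r < best[0]):
--                 best = (r, value)
--         if best is not None:
--             yield (tax_id, best[1])
-- ===== Notes on version B (the rewrite author's own statement) =====
-- stated objective: alternative
-- what changed: Instead of testing the dict for each hard-coded key in priority order, B makes a single pass over each taxon's name entries keeping the minimum-rank entry under a rank table, then yields it.
import Mathlib
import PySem

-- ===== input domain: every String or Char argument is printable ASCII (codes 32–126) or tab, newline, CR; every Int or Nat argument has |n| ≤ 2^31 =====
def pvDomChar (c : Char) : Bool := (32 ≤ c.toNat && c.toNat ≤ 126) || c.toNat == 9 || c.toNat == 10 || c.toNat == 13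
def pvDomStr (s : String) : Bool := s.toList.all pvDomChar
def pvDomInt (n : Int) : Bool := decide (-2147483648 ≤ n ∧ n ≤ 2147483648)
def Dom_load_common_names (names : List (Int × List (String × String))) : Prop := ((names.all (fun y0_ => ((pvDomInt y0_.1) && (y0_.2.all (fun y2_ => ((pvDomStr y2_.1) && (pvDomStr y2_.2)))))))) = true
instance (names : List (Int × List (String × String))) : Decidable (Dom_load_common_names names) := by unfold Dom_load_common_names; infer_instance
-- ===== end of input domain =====

-- B replaces A's per-key membership cascade by one pass over each taxon's entries keeping the minimum-rank entry (alternative decomposition; same behaviour).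

-- ===== PORT A =====
-- 'k in tax_names' / 'tax_names[k]' on the assoc-list dict: first match.
def load_common_names (names : List (Int × List (String × String))) : List (Int × String) :=
  names.foldl (fun acc p =>
    match p.2.find? (fun q => q.1 == "blast name") with
    | some q => acc ++ [(p.1, q.2)]
    | none =>
      match p.2.find? (fun q => q.1 == "genbank common name") with
      | some q => acc ++ [(p.1, q.2)]
      | none =>
        match p.2.find? (fun q => q.1 == "common name") with
        | some q => acc ++ [(p.1, q.2)]
        | none => acc) []

-- ===== PORT B =====
-- RANK.get(key)
def pvRank (k : String) : Option Nat :=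
  if k == "blast name" then some 0
  else if k == "genbank common name" then some 1
  else if k == "common name" then some 2
  else none

-- the inner loop body: update 'best' with one entry
def pvStep (best : Option (Nat × String)) (q : String × String) : Option (Nat × String) :=
  match pvRank q.1 with
  | none => best
  | some r =>
    match best with
    | none => some (r, q.2)
    | some b => if r < b.1 then some (r, q.2) else best

def load_common_names_alt (names : List (Int × List (String × String))) : List (Int × String) :=
  names.flatMap (fun p =>
    match p.2.foldl pvStep none with
    | some b => [(p.1, b.2)]
    | none => [])

-- ===== PRECONDITION & SPEC =====
def Spec_load_common_names (names : List (Int × List (String × String))) (out : List (Int × String)) : Prop := out = load_common_names_alt names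
instance (names : List (Int × List (String × String))) (out : List (Int × String)) : Decidable (Spec_load_common_names names out) := by unfold Spec_load_common_names; infer_instance

-- ===== CLAIM (what is proved, stated in full; the proofs are below) =====
def Claim_equal_load_common_names : Prop := ∀ (names : List (Int × List (String × String))), Dom_load_common_names names → Spec_load_common_names names (load_common_names names)

-- ===== LEMMAS AND PROOFS =====

-- left-biased combination of two 'best' candidates
def pvCombine (a b : Option (Nat × String)) : Option (Nat × String) :=
  match a with
  | none => b
  | some x =>
    match b with
    | none => some x
    | some y => if y.1 < x.1 then some y else some x

-- A's cascade on one taxon's entry list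
def pvCascade (l : List (String × String)) : Option (Nat × String) :=
  match l.find? (fun q => q.1 == "blast name") with
  | some q => some (0, q.2)
  | none =>
    match l.find? (fun q => q.1 == "genbank common name") with
    | some q => some (1, q.2)
    | none =>
      match l.find? (fun q => q.1 == "common name") with
      | some q => some (2, q.2)
      | none => none

theorem pvStep_eq_combine (best : Option (Nat × String)) (q : String × String) :
    pvStep best q = pvCombine best (pvStep none q) := by
  unfold pvStep pvCombine
  cases pvRank q.1 with
  | none => cases best <;> simp
  | some r => cases best <;> simp

theorem pvCombine_assoc (a b c : Option (Nat × String)) :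
    pvCombine (pvCombine a b) c = pvCombine a (pvCombine b c) := by
  cases a with
  | none => simp [pvCombine]
  | some x =>
    cases b with
    | none => simp [pvCombine]
    | some y =>
      cases c with
      | none =>
        by_cases h : y.1 < x.1 <;> simp [pvCombine, h]
      | some z =>
        by_cases h1 : y.1 < x.1 <;> by_cases h2 : z.1 < y.1 <;> by_cases h3 : z.1 < x.1 <;>
          first
          | (exfalso; omega)
          | simp [pvCombine, h1, h2, h3]

theorem pv_foldl_combine (l : List (String × String)) (best : Option (Nat × String)) :
    l.foldl pvStep best = pvCombine best (l.foldl pvStep none) := by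
  induction l generalizing best with
  | nil => cases best <;> simp [pvCombine]
  | cons x xs ih =>
    simp only [List.foldl]
    rw [ih (pvStep best x), ih (pvStep none x), pvStep_eq_combine best x, pvCombine_assoc]

theorem pv_fold_eq_cascade (l : List (String × String)) :
    l.foldl pvStep none = pvCascade l := by
  induction l with
  | nil => simp [pvCascade]
  | cons x xs ih =>
    have h : (x :: xs).foldl pvStep none = pvCombine (pvStep none x) (pvCascade xs) := by
      simp only [List.foldl]
      rw [pv_foldl_combine, ih]
    rw [h]
    by_cases hb : x.1 = "blast name"
    · have hs : pvStep none x = some (0, x.2) := by simp [pvStep, pvRank, hb]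
      have hcx : pvCascade (x :: xs) = some (0, x.2) := by
        unfold pvCascade
        rw [List.find?_cons_of_pos (by simp [hb])]
      rw [hs, hcx]
      cases pvCascade xs with
      | none => rfl
      | some y => simp [pvCombine]
    · by_cases hg : x.1 = "genbank common name"
      · have hs : pvStep none x = some (1, x.2) := by simp [pvStep, pvRank, hg]
        have hcx : pvCascade (x :: xs) =
            (match xs.find? (fun q => q.1 == "blast name") with
             | some q => some (0, q.2)
             | none => some (1, x.2)) := by
          unfold pvCascade
          rw [List.find?_cons_of_neg (by simp [hb]),
              List.find?_cons_of_pos (by simp [hg])]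
        rw [hs, hcx]
        unfold pvCascade
        cases h1 : xs.find? (fun q => q.1 == "blast name") with
        | some q => simp [pvCombine]
        | none =>
          cases h2 : xs.find? (fun q => q.1 == "genbank common name") <;>
            cases h3 : xs.find? (fun q => q.1 == "common name") <;>
            simp [pvCombine]
      · by_cases hc : x.1 = "common name"
        · have hs : pvStep none x = some (2, x.2) := by simp [pvStep, pvRank, hc]
          have hcx : pvCascade (x :: xs) =
              (match xs.find? (fun q => q.1 == "blast name") with
               | some q => some (0, q.2)
               | none =>
                 match xs.find? (fun q => q.1 == "genbank common name") with
                 | some q => some (1, q.2)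
                 | none => some (2, x.2)) := by
            unfold pvCascade
            rw [List.find?_cons_of_neg (by simp [hb]),
                List.find?_cons_of_neg (by simp [hg]),
                List.find?_cons_of_pos (by simp [hc])]
          rw [hs, hcx]
          unfold pvCascade
          cases h1 : xs.find? (fun q => q.1 == "blast name") with
          | some q => simp [pvCombine]
          | none =>
            cases h2 : xs.find? (fun q => q.1 == "genbank common name") <;>
              cases h3 : xs.find? (fun q => q.1 == "common name") <;>
              simp [pvCombine]
        · have hs : pvStep none x = none := by simp [pvStep, pvRank, hb, hg, hc]
          have hcx : pvCascade (x :: xs) = pvCascade xs := by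
            unfold pvCascade
            rw [List.find?_cons_of_neg (by simp [hb]),
                List.find?_cons_of_neg (by simp [hg]),
                List.find?_cons_of_neg (by simp [hc])]
          rw [hs, hcx]
          rfl

-- A's loop body equals 'append B's per-element result'
theorem pv_fun_eq :
    (fun (acc : List (Int × String)) (p : Int × List (String × String)) =>
      match p.2.find? (fun q => q.1 == "blast name") with
      | some q => acc ++ [(p.1, q.2)]
      | none =>
        match p.2.find? (fun q => q.1 == "genbank common name") with
        | some q => acc ++ [(p.1, q.2)]
        | none =>
          match p.2.find? (fun q => q.1 == "common name") with
          | some q => acc ++ [(p.1, q.2)]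
          | none => acc)
    =
    (fun (acc : List (Int × String)) (p : Int × List (String × String)) =>
      acc ++
        (match p.2.foldl pvStep none with
        | some b => [(p.1, b.2)]
        | none => [])) := by
  funext acc p
  rw [pv_fold_eq_cascade]
  unfold pvCascade
  cases hb : p.2.find? (fun q => q.1 == "blast name") <;>
    cases hg : p.2.find? (fun q => q.1 == "genbank common name") <;>
    cases hc : p.2.find? (fun q => q.1 == "common name") <;> simp

-- ===== VERDICT (by name: the statement is the Claim_ definition above) =====
theorem load_common_names_spec : Claim_equal_load_common_names := by
  intro names _
  unfold Spec_load_common_names load_common_names load_common_names_alt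
  rw [pv_fun_eq]
  exact (PySem.List.foldl_append_eq_flatMap _ _ _).trans (List.nil_append _)
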